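-- pv_equiv track=rewrite | github.com/ritesh-deshmukh/Algorithms-and-Data-Structures | Random Practice/test23.py | nth_most_rare
-- ===== SOURCE A (Python) =====
-- import operator
--
-- def nth_most_rare(elements, n):
--     dict1 = {}
--     for each in elements:
--         if each in dict1:
--             dict1[each] += 1
--         else:
--             dict1[each] = 1
--
--     sorted_dict = sorted(dict1.items(), key=operator.itemgetter(1))
--
--     if n < len(dict1):
--         return_arr = []
--         for item in sorted_dict:
--             if item[1] == n:
--                 return_arr.append(str(item[0]))
--         return ", ".join(return_arr)
--     else:
--         return " "
-- ===== SOURCE B (Python) =====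
-- def nth_most_rare(elements, n):
--     counts = {}
--     for x in elements:
--         counts[x] = counts.get(x, 0) + 1
--     groups = {}
--     for value, count in counts.items():
--         groups.setdefault(count, []).append(str(value))
--     if n < len(counts):
--         return ", ".join(groups.get(n, []))
--     return " "
-- ===== Notes on version B (the rewrite author's own statement) =====
-- stated objective: alternative
-- what changed: Replaces A's sort of the count items plus a filtering pass with an inverted frequency-to-bucket index built in one pass over the counts, so the answer is a single bucket lookup; correctness relies on A's stable sort preserving first-appearance order among equal counts.
import Mathlib
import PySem

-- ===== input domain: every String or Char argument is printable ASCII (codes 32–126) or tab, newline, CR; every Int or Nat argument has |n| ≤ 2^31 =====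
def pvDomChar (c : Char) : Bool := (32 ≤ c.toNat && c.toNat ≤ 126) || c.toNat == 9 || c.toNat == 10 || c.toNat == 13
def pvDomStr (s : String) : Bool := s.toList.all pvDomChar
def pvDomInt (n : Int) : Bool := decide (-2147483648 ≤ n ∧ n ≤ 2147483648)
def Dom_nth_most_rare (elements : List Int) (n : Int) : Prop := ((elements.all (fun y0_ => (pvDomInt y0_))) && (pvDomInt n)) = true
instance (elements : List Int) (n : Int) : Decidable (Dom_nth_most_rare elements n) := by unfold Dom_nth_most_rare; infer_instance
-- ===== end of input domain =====

-- B replaces A's sort-then-filter of the count items by an inverted frequency→bucket index built in one pass (alternative decomposition).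

-- ===== PORT A =====
def nth_most_rare (elements : List Int) (n : Int) : String :=
  let dict1 : PySem.Dict Int Int :=
    elements.foldl
      (fun d each =>
        if d.contains each then d.insert each (d.getD each 0 + 1)
        else d.insert each 1)
      PySem.Dict.empty
  let sorted_dict := PySem.List.sorted dict1.items (fun item => item.2)
  if n < (dict1.size : Int) then
    let return_arr := sorted_dict.foldl
      (fun acc item => if item.2 == n then acc ++ [PySem.Int.toStr item.1] else acc) []
    PySem.Str.join ", " return_arr
  else " "

-- ===== PORT B =====
def nth_most_rare_alt (elements : List Int) (n : Int) : String :=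
  let counts : PySem.Dict Int Int :=
    elements.foldl (fun d x => d.insert x (d.getD x 0 + 1)) PySem.Dict.empty
  let groups : PySem.Dict Int (List String) :=
    counts.items.foldl
      (fun g p => g.modify p.2 [] (fun b => b ++ [PySem.Int.toStr p.1]))
      PySem.Dict.empty
  if n < (counts.size : Int) then
    PySem.Str.join ", " (groups.getD n [])
  else " "

-- ===== PRECONDITION & SPEC =====
def Spec_nth_most_rare (elements : List Int) (n : Int) (out : String) : Prop := out = nth_most_rare_alt elements n
instance (elements : List Int) (n : Int) (out : String) : Decidable (Spec_nth_most_rare elements n out) := by unfold Spec_nth_most_rare; infer_instance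

-- ===== CLAIM (what is proved, stated in full; the proofs are below) =====
def Claim_equal_nth_most_rare : Prop := ∀ (elements : List Int) (n : Int), Dom_nth_most_rare elements n → Spec_nth_most_rare elements n (nth_most_rare elements n)

-- ===== LEMMAS AND PROOFS =====

-- The two counting loops build the same dict: A's `contains` branch is redundant.
theorem counts_eq (elements : List Int) :
    elements.foldl
      (fun d each =>
        if d.contains each then d.insert each (d.getD each 0 + 1)
        else d.insert each 1)
      (PySem.Dict.empty : PySem.Dict Int Int)
    = elements.foldl (fun d x => d.insert x (d.getD x 0 + 1)) PySem.Dict.empty := by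
  have hfun : (fun (d : PySem.Dict Int Int) each =>
        if d.contains each then d.insert each (d.getD each 0 + 1)
        else d.insert each 1)
      = fun d x => d.insert x (d.getD x 0 + 1) := by
    funext d x
    by_cases h : d.contains x = true
    · simp [h]
    · have hf : d.contains x = false := by simpa using h
      simp [hf, PySem.Dict.getD_of_not_contains d 0 hf]
  rw [hfun]

-- Inserting into a key-sorted list does not change the sublist of entries with a fixed key
-- (the stability fact A's sort-then-filter relies on).
theorem filter_insertBy (n : Int) (x : Int × Int) (ys : List (Int × Int))
    (h : ys.Pairwise (fun a b => a.2 ≤ b.2)) :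
    (PySem.List.insertBy (fun a b => decide (a.2 < b.2)) x ys).filter (fun p => p.2 == n)
    = if x.2 == n then ys.filter (fun p => p.2 == n) ++ [x]
      else ys.filter (fun p => p.2 == n) := by
  induction ys with
  | nil =>
    by_cases hx : x.2 = n <;> simp [PySem.List.insertBy, List.filter, hx]
  | cons y ys ih =>
    rw [List.pairwise_cons] at h
    simp only [PySem.List.insertBy]
    by_cases hb : x.2 < y.2
    · simp only [hb, decide_true, if_true]
      by_cases hx : x.2 = n
      · have hnil : (y :: ys).filter (fun p => p.2 == n) = [] := by
          rw [List.filter_eq_nil_iff]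
          intro p hp
          have hy : y.2 ≤ p.2 := by
            rcases List.mem_cons.mp hp with h1 | h2
            · simp [h1]
            · exact h.1 _ h2
          simp only [beq_iff_eq]
          omega
        simp [hx, hnil]
      · simp [List.filter_cons, hx]
    · simp only [hb, decide_false, Bool.false_eq_true, if_false]
      rw [List.filter_cons, List.filter_cons, ih h.2]
      by_cases hx : x.2 = n <;> by_cases hy : y.2 = n <;> simp [hx, hy]

-- Stable sort by count keeps the entries with count n in their original order.
theorem filter_sorted (n : Int) (xs : List (Int × Int)) :
    (PySem.List.sorted xs (fun p => p.2)).filter (fun p => p.2 == n)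
    = xs.filter (fun p => p.2 == n) := by
  induction xs using List.reverseRecOn with
  | nil => simp [PySem.List.sorted_eq_foldl_insertBy]
  | append_singleton xs x ih =>
    rw [PySem.List.sorted_eq_foldl_insertBy, List.foldl_append, List.foldl_cons, List.foldl_nil,
      ← PySem.List.sorted_eq_foldl_insertBy]
    rw [filter_insertBy n x _ (PySem.List.sorted_pairwise xs (fun p => p.2)), ih]
    by_cases hx : x.2 = n <;> simp [hx, List.filter_append]

-- B's inverted index: bucket n holds exactly the names of the count-n entries, in order.
theorem groups_getD (l : List (Int × Int)) (n : Int) :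
    (l.foldl (fun g p => g.modify p.2 [] (fun b => b ++ [PySem.Int.toStr p.1]))
      (PySem.Dict.empty : PySem.Dict Int (List String))).getD n []
    = (l.filter (fun p => p.2 == n)).map (fun p => PySem.Int.toStr p.1) := by
  have hstep : ∀ (l : List (Int × Int)) (init : PySem.Dict Int (List String)),
      l.foldl (fun g p => g.modify p.2 [] (fun b => b ++ [PySem.Int.toStr p.1])) init
      = (l.map (fun p => (p.2, PySem.Int.toStr p.1))).foldl
          (fun g q => g.modify q.1 [] (fun b => b ++ [q.2])) init := by
    intro l
    induction l with
    | nil => intro init; rfl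
    | cons a l ih => intro init; simp only [List.foldl_cons, List.map_cons]; exact ih _
  rw [hstep, PySem.Dict.getD_foldl_modify_append]
  simp [List.filter_map, List.map_map, Function.comp_def]

-- ===== VERDICT (by name: the statement is the Claim_ definition above) =====
theorem nth_most_rare_spec : Claim_equal_nth_most_rare := by
  intro elements n _
  unfold Spec_nth_most_rare nth_most_rare nth_most_rare_alt
  simp only [counts_eq]
  set d := elements.foldl (fun g x => g.insert x (g.getD x 0 + 1))
    (PySem.Dict.empty : PySem.Dict Int Int) with hd
  by_cases hn : n < (d.size : Int)
  · simp only [hn, if_true]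
    rw [PySem.List.foldl_append_if (fun (item : Int × Int) => item.2 == n)
      (fun (item : Int × Int) => PySem.Int.toStr item.1)
      (PySem.List.sorted d.items (fun item => item.2)) []]
    rw [filter_sorted n d.items, groups_getD]
    simp
  · simp [hn]
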